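-- pv_equiv track=rewrite | github.com/avidsolutions/author-rpa | update_presentation.py | is_lorem_ipsum
-- ===== SOURCE A (Python) =====
-- def is_lorem_ipsum(text):
--     """Check if text contains Lorem ipsum or similar placeholder text."""
--     lorem_indicators = [
--         'lorem ipsum', 'dolor sit amet', 'consectetur adipiscing',
--         'elit', 'proin', 'nulla', 'adipiscing', 'tempor incididunt',
--         'labore et dolore', 'magna aliqua', 'enim ad minim', 'veniam',
--         'quis nostrud', 'exercitation', 'ullamco', 'laboris',
--         'consequat', 'duis aute', 'irure dolor', 'reprehenderit',
--         'voluptate', 'velit esse', 'cillum', 'fugiat nulla', 'pariatur',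
--         'excepteur sint', 'occaecat', 'cupidatat', 'proident', 'sunt in culpa',
--         'officia deserunt', 'mollit anim', 'est laborum', 'euismod',
--         'aliquip ex ea', 'commodo consequat'
--     ]
--     text_lower = text.lower()
--     return any(indicator in text_lower for indicator in lorem_indicators)
-- ===== SOURCE B (Python) =====
-- # First-character dispatch: indicators grouped by their first letter; the text is
-- # scanned once and at each position only the few tails keyed by that character
-- # are prefix-tested, instead of one full substring search per indicator.
-- _TAILS_BY_FIRST = {
--     'l': ['orem ipsum', 'abore et dolore', 'aboris'],
--     'd': ['olor sit amet', 'uis aute'],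
--     'c': ['onsectetur adipiscing', 'onsequat', 'illum', 'upidatat',
--           'ommodo consequat'],
--     'e': ['lit', 'nim ad minim', 'xercitation', 'xcepteur sint',
--           'st laborum', 'uismod'],
--     'p': ['roin', 'ariatur', 'roident'],
--     'n': ['ulla'],
--     'a': ['dipiscing', 'liquip ex ea'],
--     't': ['empor incididunt'],
--     'm': ['agna aliqua', 'ollit anim'],
--     'v': ['eniam', 'oluptate', 'elit esse'],
--     'q': ['uis nostrud'],
--     'u': ['llamco'],
--     'i': ['rure dolor'],
--     'r': ['eprehenderit'],
--     'f': ['ugiat nulla'],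
--     'o': ['ccaecat', 'fficia deserunt'],
--     's': ['unt in culpa'],
-- }
--
-- def is_lorem_ipsum(text):
--     """Check if text contains Lorem ipsum or similar placeholder text."""
--     t = text.lower()
--     for i, c in enumerate(t):
--         for tail in _TAILS_BY_FIRST.get(c, ()):
--             if t.startswith(tail, i + 1):
--                 return True
--     return False
-- ===== Notes on version B (the rewrite author's own statement) =====
-- stated objective: alternative
-- what changed: A runs one full substring search over the text per indicator (36 scans); B pre-groups the indicators into a dict keyed by first letter and makes a single left-to-right scan, at each position prefix-testing only the tails filed under that character.
import Mathlib
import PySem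

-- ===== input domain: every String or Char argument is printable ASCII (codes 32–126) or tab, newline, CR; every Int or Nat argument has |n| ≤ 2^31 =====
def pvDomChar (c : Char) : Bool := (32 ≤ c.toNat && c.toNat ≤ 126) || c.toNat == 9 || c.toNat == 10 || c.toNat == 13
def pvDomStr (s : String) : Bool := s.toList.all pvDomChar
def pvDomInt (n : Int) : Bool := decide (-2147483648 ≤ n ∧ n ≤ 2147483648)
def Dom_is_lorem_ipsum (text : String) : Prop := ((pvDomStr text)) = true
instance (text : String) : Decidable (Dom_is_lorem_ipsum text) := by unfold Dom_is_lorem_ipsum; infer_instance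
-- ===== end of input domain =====

-- B replaces A's 36 separate substring searches by one scan of the text with a
-- first-letter dispatch table of indicator tails; same results (objective: alternative).

-- ===== PORT A =====
def loremIndicators : List String := [
  "lorem ipsum", "dolor sit amet", "consectetur adipiscing",
  "elit", "proin", "nulla", "adipiscing", "tempor incididunt",
  "labore et dolore", "magna aliqua", "enim ad minim", "veniam",
  "quis nostrud", "exercitation", "ullamco", "laboris",
  "consequat", "duis aute", "irure dolor", "reprehenderit",
  "voluptate", "velit esse", "cillum", "fugiat nulla", "pariatur",
  "excepteur sint", "occaecat", "cupidatat", "proident", "sunt in culpa",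
  "officia deserunt", "mollit anim", "est laborum", "euismod",
  "aliquip ex ea", "commodo consequat"]

def is_lorem_ipsum (text : String) : Bool :=
  let text_lower := PySem.Str.lower text
  loremIndicators.any (fun indicator => PySem.Str.isIn indicator text_lower)

-- ===== PORT B =====
-- Source B's module dict _TAILS_BY_FIRST, as an association list (insertion order).
def loremTailsByFirst : PySem.Dict Char (List String) := PySem.Dict.mk [
  ('l', ["orem ipsum", "abore et dolore", "aboris"]),
  ('d', ["olor sit amet", "uis aute"]),
  ('c', ["onsectetur adipiscing", "onsequat", "illum", "upidatat",
         "ommodo consequat"]),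
  ('e', ["lit", "nim ad minim", "xercitation", "xcepteur sint",
         "st laborum", "uismod"]),
  ('p', ["roin", "ariatur", "roident"]),
  ('n', ["ulla"]),
  ('a', ["dipiscing", "liquip ex ea"]),
  ('t', ["empor incididunt"]),
  ('m', ["agna aliqua", "ollit anim"]),
  ('v', ["eniam", "oluptate", "elit esse"]),
  ('q', ["uis nostrud"]),
  ('u', ["llamco"]),
  ('i', ["rure dolor"]),
  ('r', ["eprehenderit"]),
  ('f', ["ugiat nulla"]),
  ('o', ["ccaecat", "fficia deserunt"]),
  ('s', ["unt in culpa"])]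

-- _TAILS_BY_FIRST.get(c, ()) : first-match lookup in the association list.
def loremTailsFor (c : Char) : List String :=
  (loremTailsByFirst.get? c).getD []

-- Source B's loop: at the position of head character c, `t.startswith(tail, i+1)`
-- is exactly "tail is a prefix of the remaining characters"; `return True`
-- inside the loop becomes `||` with the recursive call on the rest.
def loremScan : List Char → Bool
  | [] => false
  | c :: rest =>
    (loremTailsFor c).any (fun tail => PySem.Chars.startswith rest tail.toList)
      || loremScan rest

def is_lorem_ipsum_alt (text : String) : Bool :=
  loremScan (PySem.Str.lower text).toList

-- ===== PRECONDITION & SPEC =====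
def Spec_is_lorem_ipsum (text : String) (out : Bool) : Prop := out = is_lorem_ipsum_alt text
instance (text : String) (out : Bool) : Decidable (Spec_is_lorem_ipsum text out) := by unfold Spec_is_lorem_ipsum; infer_instance

-- ===== CLAIM (what is proved, stated in full; the proofs are below) =====
def Claim_equal_is_lorem_ipsum : Prop := ∀ (text : String), Dom_is_lorem_ipsum text → Spec_is_lorem_ipsum text (is_lorem_ipsum text)

-- ===== LEMMAS AND PROOFS =====

-- 'sub in (c :: L)' = "sub is a prefix here, or sub in L".
theorem isIn_cons (sub : List Char) (c : Char) (L : List Char) :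
    PySem.Chars.isIn sub (c :: L)
      = (PySem.Chars.startswith (c :: L) sub || PySem.Chars.isIn sub L) := by
  rw [Bool.eq_iff_iff, Bool.or_eq_true, PySem.Chars.startswith_iff,
    ← PySem.Chars.exists_prefix_drop_iff_isIn, ← PySem.Chars.exists_prefix_drop_iff_isIn]
  constructor
  · rintro ⟨i, hi⟩
    cases i with
    | zero => exact Or.inl (by simpa using hi)
    | succ j => exact Or.inr ⟨j, by simpa using hi⟩
  · rintro (h | ⟨j, hj⟩)
    · exact ⟨0, by simpa⟩
    · exact ⟨j + 1, by simpa⟩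

-- The dispatch at one position equals "some indicator starts here".
set_option maxRecDepth 20000 in
theorem tails_hit_eq (c : Char) (rest : List Char) :
    (loremTailsFor c).any (fun tail => PySem.Chars.startswith rest tail.toList)
      = loremIndicators.any (fun ind => PySem.Chars.startswith (c :: rest) ind.toList) := by
  have hsw : ∀ (d : Char) (tl : List Char),
      PySem.Chars.startswith (c :: rest) (d :: tl)
        = ((c == d) && PySem.Chars.startswith rest tl) := by
    intro d tl
    rw [Bool.eq_iff_iff, PySem.Chars.startswith_iff, Bool.and_eq_true,
      PySem.Chars.startswith_iff, List.cons_prefix_cons, beq_iff_eq]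
    exact and_congr_left fun _ => eq_comm
  by_cases h1 : c = 'l'
  · subst h1
    rw [show loremTailsFor 'l' = ["orem ipsum", "abore et dolore", "aboris"] from by decide]
    simp [loremIndicators, hsw]
  by_cases h2 : c = 'd'
  · subst h2
    rw [show loremTailsFor 'd' = ["olor sit amet", "uis aute"] from by decide]
    simp [loremIndicators, hsw]
  by_cases h3 : c = 'c'
  · subst h3
    rw [show loremTailsFor 'c' = ["onsectetur adipiscing", "onsequat", "illum", "upidatat", "ommodo consequat"] from by decide]
    simp [loremIndicators, hsw]
  by_cases h4 : c = 'e'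
  · subst h4
    rw [show loremTailsFor 'e' = ["lit", "nim ad minim", "xercitation", "xcepteur sint", "st laborum", "uismod"] from by decide]
    simp [loremIndicators, hsw]
  by_cases h5 : c = 'p'
  · subst h5
    rw [show loremTailsFor 'p' = ["roin", "ariatur", "roident"] from by decide]
    simp [loremIndicators, hsw]
  by_cases h6 : c = 'n'
  · subst h6
    rw [show loremTailsFor 'n' = ["ulla"] from by decide]
    simp [loremIndicators, hsw]
  by_cases h7 : c = 'a'
  · subst h7
    rw [show loremTailsFor 'a' = ["dipiscing", "liquip ex ea"] from by decide]
    simp [loremIndicators, hsw]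
  by_cases h8 : c = 't'
  · subst h8
    rw [show loremTailsFor 't' = ["empor incididunt"] from by decide]
    simp [loremIndicators, hsw]
  by_cases h9 : c = 'm'
  · subst h9
    rw [show loremTailsFor 'm' = ["agna aliqua", "ollit anim"] from by decide]
    simp [loremIndicators, hsw]
  by_cases h10 : c = 'v'
  · subst h10
    rw [show loremTailsFor 'v' = ["eniam", "oluptate", "elit esse"] from by decide]
    simp [loremIndicators, hsw]
  by_cases h11 : c = 'q'
  · subst h11
    rw [show loremTailsFor 'q' = ["uis nostrud"] from by decide]
    simp [loremIndicators, hsw]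
  by_cases h12 : c = 'u'
  · subst h12
    rw [show loremTailsFor 'u' = ["llamco"] from by decide]
    simp [loremIndicators, hsw]
  by_cases h13 : c = 'i'
  · subst h13
    rw [show loremTailsFor 'i' = ["rure dolor"] from by decide]
    simp [loremIndicators, hsw]
  by_cases h14 : c = 'r'
  · subst h14
    rw [show loremTailsFor 'r' = ["eprehenderit"] from by decide]
    simp [loremIndicators, hsw]
  by_cases h15 : c = 'f'
  · subst h15
    rw [show loremTailsFor 'f' = ["ugiat nulla"] from by decide]
    simp [loremIndicators, hsw]
  by_cases h16 : c = 'o'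
  · subst h16
    rw [show loremTailsFor 'o' = ["ccaecat", "fficia deserunt"] from by decide]
    simp [loremIndicators, hsw]
  by_cases h17 : c = 's'
  · subst h17
    rw [show loremTailsFor 's' = ["unt in culpa"] from by decide]
    simp [loremIndicators, hsw]
  · have hnone : loremTailsFor c = [] := by
      simp [loremTailsFor, loremTailsByFirst, PySem.Dict.get?,
        beq_eq_false_iff_ne.mpr (Ne.symm h1), beq_eq_false_iff_ne.mpr (Ne.symm h2), beq_eq_false_iff_ne.mpr (Ne.symm h3), beq_eq_false_iff_ne.mpr (Ne.symm h4), beq_eq_false_iff_ne.mpr (Ne.symm h5), beq_eq_false_iff_ne.mpr (Ne.symm h6), beq_eq_false_iff_ne.mpr (Ne.symm h7), beq_eq_false_iff_ne.mpr (Ne.symm h8), beq_eq_false_iff_ne.mpr (Ne.symm h9), beq_eq_false_iff_ne.mpr (Ne.symm h10), beq_eq_false_iff_ne.mpr (Ne.symm h11), beq_eq_false_iff_ne.mpr (Ne.symm h12), beq_eq_false_iff_ne.mpr (Ne.symm h13), beq_eq_false_iff_ne.mpr (Ne.symm h14), beq_eq_false_iff_ne.mpr (Ne.symm h15), beq_eq_false_iff_ne.mpr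 (Ne.symm h16), beq_eq_false_iff_ne.mpr (Ne.symm h17)]
    rw [hnone]
    simp [loremIndicators, hsw, beq_eq_false_iff_ne.mpr h1, beq_eq_false_iff_ne.mpr h2, beq_eq_false_iff_ne.mpr h3, beq_eq_false_iff_ne.mpr h4, beq_eq_false_iff_ne.mpr h5, beq_eq_false_iff_ne.mpr h6, beq_eq_false_iff_ne.mpr h7, beq_eq_false_iff_ne.mpr h8, beq_eq_false_iff_ne.mpr h9, beq_eq_false_iff_ne.mpr h10, beq_eq_false_iff_ne.mpr h11, beq_eq_false_iff_ne.mpr h12, beq_eq_false_iff_ne.mpr h13, beq_eq_false_iff_ne.mpr h14, beq_eq_false_iff_ne.mpr h15, beq_eq_false_iff_ne.mpr h16, beq_eq_false_iff_ne.mpr h17]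

theorem scan_eq (L : List Char) :
    loremScan L = loremIndicators.any (fun ind => PySem.Chars.isIn ind.toList L) := by
  induction L with
  | nil => decide
  | cons c rest ih =>
    have hdist : loremIndicators.any (fun ind => PySem.Chars.isIn ind.toList (c :: rest))
        = (loremIndicators.any (fun ind => PySem.Chars.startswith (c :: rest) ind.toList)
            || loremIndicators.any (fun ind => PySem.Chars.isIn ind.toList rest)) := by
      rw [Bool.eq_iff_iff, Bool.or_eq_true]
      simp only [List.any_eq_true, isIn_cons, Bool.or_eq_true]
      constructor
      · rintro ⟨x, hx, h | h⟩
        exacts [Or.inl ⟨x, hx, h⟩, Or.inr ⟨x, hx, h⟩]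
      · rintro (⟨x, hx, h⟩ | ⟨x, hx, h⟩)
        exacts [⟨x, hx, Or.inl h⟩, ⟨x, hx, Or.inr h⟩]
    rw [loremScan, tails_hit_eq, ih, hdist]

-- ===== VERDICT (by name: the statement is the Claim_ definition above) =====
theorem is_lorem_ipsum_spec : Claim_equal_is_lorem_ipsum := by
  intro text _
  unfold Spec_is_lorem_ipsum is_lorem_ipsum is_lorem_ipsum_alt
  rw [scan_eq]
  simp [PySem.Str.isIn_eq]
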